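-- pv_equiv track=rewrite | github.com/ShahnawazDev/ip-project-evaluation | Piyush Saini/metro.py | nextrain
-- ===== SOURCE A (Python) =====
-- def totaltime(line_stations):
--     total = 0
--     for station,time in line_stations.items():
--         total += time[1]
--     return total
--
-- def nextrain(now, traintime1, stations, direction,n=5):
--     lst = []
--     startime = 6 * 60
--     stoptime = 23 * 60
--     noon = 24 * 60
--     o2 = totaltime(stations) - traintime1
--     # This is for the normal case from 6:00am to 12:00pm, with 12:00pm exclusive and 6:00am inclusive
--     dep = startime
--     while dep < stoptime:
--         hour = dep // 60
--         if (8 <= hour < 10 or 17 <= hour < 19):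
--             freq = 4
--         else:
--             freq = 8
--         ttime = dep + traintime1
--         if ttime > now:
--             lst.append(ttime)
--         if direction:
--             a2 = dep + o2
--             if a2 > now:
--                 lst.append(a2)
--         dep += freq
--     # 2) for train finally departing at 23:00pm last time from each ends of the metro line.
--     # for forward
--     lasttime = stoptime
--     final_arrivals = []
--     finaltime1 = lasttime + traintime1
--     if finaltime1 > now and finaltime1 < noon:
--         final_arrivals.append(finaltime1)
--     # for backword
--     if direction:
--         finaltime2 = lasttime + o2
--         if finaltime2 > now and finaltime2 < noon:
--             final_arrivals.append(finaltime2)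
--     # if time is more than or equal to 23:00pm
--     if now >= stoptime:
--         if not final_arrivals:
--             return []
--         return [min(final_arrivals)]
--     if final_arrivals:
--         earliest_final = min(final_arrivals)
--         if earliest_final not in lst:
--             lst.append(earliest_final)
--     lst = sorted(set(lst))
--     return lst[:5]
-- ===== SOURCE B (Python) =====
-- # B: precomputed timetable + ordered two-pointer merge of the forward/backward
-- # arrival streams (dedup while merging), instead of append-all/sort/set/slice.
--
-- def _departures():
--     deps = []
--     d = 360
--     while d < 1380:
--         deps.append(d)
--         d += 4 if (480 <= d < 600 or 1020 <= d < 1140) else 8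
--     return deps
--
-- _DEPS = _departures()
--
-- def _merge(xs, ys):
--     out = []
--     i = j = 0
--     while i < len(xs) and j < len(ys):
--         x, y = xs[i], ys[j]
--         if x < y:
--             out.append(x); i += 1
--         elif y < x:
--             out.append(y); j += 1
--         else:
--             out.append(x); i += 1; j += 1
--     out.extend(xs[i:])
--     out.extend(ys[j:])
--     return out
--
-- def nextrain(now, traintime1, stations, direction, n=5):
--     o2 = sum(t[1] for t in stations.values()) - traintime1
--     cands = [1380 + traintime1, 1380 + o2] if direction else [1380 + traintime1]
--     finals = [t for t in cands if now < t < 1440]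
--     if now >= 1380:
--         return [min(finals)] if finals else []
--     fwd = [d + traintime1 for d in _DEPS if d + traintime1 > now]
--     bwd = [d + o2 for d in _DEPS if d + o2 > now] if direction else []
--     extra = [min(finals)] if finals else []
--     return _merge(_merge(fwd, bwd), extra)[:5]
-- ===== Notes on version B (the rewrite author's own statement) =====
-- stated objective: alternative
-- what changed: B precomputes the fixed departure timetable once at module level, builds the forward and backward arrival streams as already-sorted lists and combines them with a deduplicating two-pointer merge (folding the earliest 23:00 final arrival in as a third stream), instead of A's append-everything then sort/set-dedup/slice pipeline.
import Mathlib
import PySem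

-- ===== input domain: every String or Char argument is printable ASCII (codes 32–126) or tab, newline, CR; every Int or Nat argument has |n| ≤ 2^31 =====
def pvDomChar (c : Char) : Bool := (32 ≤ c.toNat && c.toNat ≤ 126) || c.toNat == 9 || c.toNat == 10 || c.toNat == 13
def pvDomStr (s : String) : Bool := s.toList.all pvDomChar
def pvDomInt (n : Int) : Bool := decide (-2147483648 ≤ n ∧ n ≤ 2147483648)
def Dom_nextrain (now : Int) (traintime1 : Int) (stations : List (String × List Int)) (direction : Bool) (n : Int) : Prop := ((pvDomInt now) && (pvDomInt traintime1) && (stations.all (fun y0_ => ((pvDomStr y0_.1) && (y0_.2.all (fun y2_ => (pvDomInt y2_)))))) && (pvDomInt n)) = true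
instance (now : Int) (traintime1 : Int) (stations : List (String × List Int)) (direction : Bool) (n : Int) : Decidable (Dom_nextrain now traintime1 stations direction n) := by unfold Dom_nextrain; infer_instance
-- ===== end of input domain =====

-- B replaces A's append-everything / sort / set-dedup / slice pipeline by a precomputed
-- departure timetable and an ordered two-pointer merge of the forward/backward arrival
-- streams (deduplicating while merging); objective: alternative algorithm, not speed.

-- ===== PORT A =====
-- helper totaltime: sums time[1] over the stations dict (items in insertion order)
def pvTotaltime (stations : List (String × List Int)) : Int :=
  stations.foldl (fun total p => total + PySem.List.pyGetD p.2 1 0) 0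

-- the while-loop body of A; fuel 300 bounds the loop (dep starts at 360, grows by ≥ 4, stops at 1380)
def pvLoopA (fuel : Nat) (now traintime1 o2 : Int) (direction : Bool) (dep : Int) (lst : List Int) : List Int :=
  match fuel with
  | 0 => lst
  | fuel + 1 =>
    if dep < 23 * 60 then
      let hour := PySem.Int.floordiv dep 60
      let freq : Int := if (8 ≤ hour ∧ hour < 10) ∨ (17 ≤ hour ∧ hour < 19) then 4 else 8
      let ttime := dep + traintime1
      let lst := if ttime > now then lst ++ [ttime] else lst
      let lst := if direction then (if dep + o2 > now then lst ++ [dep + o2] else lst) else lst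
      pvLoopA fuel now traintime1 o2 direction (dep + freq) lst
    else lst

def nextrain (now : Int) (traintime1 : Int) (stations : List (String × List Int)) (direction : Bool) (n : Int) : List Int :=
  let startime : Int := 6 * 60
  let stoptime : Int := 23 * 60
  let noon : Int := 24 * 60
  let o2 := pvTotaltime stations - traintime1
  let lst := pvLoopA 300 now traintime1 o2 direction startime []
  let finaltime1 := stoptime + traintime1
  let finalArrivals : List Int := if finaltime1 > now ∧ finaltime1 < noon then [finaltime1] else []
  let finalArrivals : List Int :=
    if direction then
      (let finaltime2 := stoptime + o2
       if finaltime2 > now ∧ finaltime2 < noon then finalArrivals ++ [finaltime2] else finalArrivals)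
    else finalArrivals
  if now ≥ stoptime then
    match PySem.List.min? finalArrivals (fun x => x) with
    | none => []
    | some m => [m]
  else
    let lst :=
      match PySem.List.min? finalArrivals (fun x => x) with
      | none => lst
      | some m => if m ∈ lst then lst else lst ++ [m]
    PySem.List.slice (PySem.List.sorted (PySem.Set.ofList lst) (fun x => x) false) none (some 5)

-- ===== PORT B =====
-- B's module-level precomputed departure timetable (the while loop in Source B; same fuel bound)
def pvDepsAux (fuel : Nat) (d : Int) : List Int :=
  match fuel with
  | 0 => []
  | fuel + 1 =>
    if d < 1380 then
      d :: pvDepsAux fuel (d + (if (480 ≤ d ∧ d < 600) ∨ (1020 ≤ d ∧ d < 1140) then 4 else 8))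
    else []

def pvDeps : List Int := pvDepsAux 300 360

-- two-pointer merge of two lists, deduplicating equal heads (B's _merge)
def pvMerge : List Int → List Int → List Int
  | [], ys => ys
  | x :: xs, [] => x :: xs
  | x :: xs, y :: ys =>
    if x < y then x :: pvMerge xs (y :: ys)
    else if y < x then y :: pvMerge (x :: xs) ys
    else x :: pvMerge xs ys

def nextrain_alt (now : Int) (traintime1 : Int) (stations : List (String × List Int)) (direction : Bool) (n : Int) : List Int :=
  let o2 := (stations.map (fun p => PySem.List.pyGetD p.2 1 0)).sum - traintime1
  let cands : List Int := if direction then [1380 + traintime1, 1380 + o2] else [1380 + traintime1]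
  let finals := cands.filter (fun t => now < t ∧ t < 1440)
  if now ≥ 1380 then
    match PySem.List.min? finals (fun x => x) with
    | none => []
    | some m => [m]
  else
    let fwd := (pvDeps.filter (fun d => d + traintime1 > now)).map (fun d => d + traintime1)
    let bwd := if direction then (pvDeps.filter (fun d => d + o2 > now)).map (fun d => d + o2) else []
    let extra : List Int :=
      match PySem.List.min? finals (fun x => x) with
      | none => []
      | some m => [m]
    (pvMerge (pvMerge fwd bwd) extra).take 5

-- ===== PRECONDITION & SPEC =====
-- Pre_ excludes stations whose time list has fewer than 2 entries: there Python's time[1] raises IndexError.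
def Pre_nextrain (now : Int) (traintime1 : Int) (stations : List (String × List Int)) (direction : Bool) (n : Int) : Prop :=
  ∀ p ∈ stations, 2 ≤ p.2.length
instance (now : Int) (traintime1 : Int) (stations : List (String × List Int)) (direction : Bool) (n : Int) : Decidable (Pre_nextrain now traintime1 stations direction n) := by unfold Pre_nextrain; infer_instance

def pvWitness_nextrain : Int × Int × (List (String × List Int)) × Bool × Int :=
  (600, 30, [("a", [1, 2]), ("b", [3, 4])], true, 5)

def Spec_nextrain (now : Int) (traintime1 : Int) (stations : List (String × List Int)) (direction : Bool) (n : Int) (out : List Int) : Prop := out = nextrain_alt now traintime1 stations direction n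
instance (now : Int) (traintime1 : Int) (stations : List (String × List Int)) (direction : Bool) (n : Int) (out : List Int) : Decidable (Spec_nextrain now traintime1 stations direction n out) := by unfold Spec_nextrain; infer_instance

-- ===== CLAIM =====
def Claim_equal_nextrain : Prop := ∀ (now : Int) (traintime1 : Int) (stations : List (String × List Int)) (direction : Bool) (n : Int), Dom_nextrain now traintime1 stations direction n → Pre_nextrain now traintime1 stations direction n → Spec_nextrain now traintime1 stations direction n (nextrain now traintime1 stations direction n)

-- ===== LEMMAS AND PROOFS =====

-- A-side departure sequence (the values dep takes in A's while loop)
def pvFreqA (dep : Int) : Int :=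
  let hour := PySem.Int.floordiv dep 60
  if (8 ≤ hour ∧ hour < 10) ∨ (17 ≤ hour ∧ hour < 19) then 4 else 8

def pvDepsA (fuel : Nat) (dep : Int) : List Int :=
  match fuel with
  | 0 => []
  | fuel + 1 => if dep < 23 * 60 then dep :: pvDepsA fuel (dep + pvFreqA dep) else []

def pvChunk (now traintime1 o2 : Int) (direction : Bool) (d : Int) : List Int :=
  (if d + traintime1 > now then [d + traintime1] else []) ++
  (if direction then (if d + o2 > now then [d + o2] else []) else [])

theorem pvLoopA_eq (now t1 o2 : Int) (dir : Bool) (fuel : Nat) (dep : Int) (acc : List Int) :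
    pvLoopA fuel now t1 o2 dir dep acc
      = acc ++ (pvDepsA fuel dep).flatMap (pvChunk now t1 o2 dir) := by
  induction fuel generalizing dep acc with
  | zero => simp [pvLoopA, pvDepsA]
  | succ f ih =>
    simp only [pvLoopA, pvDepsA, pvFreqA]
    split
    · rw [ih]
      simp only [List.flatMap_cons, pvChunk]
      split_ifs <;> simp
    · simp

set_option maxRecDepth 40000 in
theorem pvDepsA_eq : pvDepsA 300 360 = pvDeps := by decide

set_option maxRecDepth 40000 in
theorem pvDeps_pairwise : pvDeps.Pairwise (· < ·) :=
  List.IsChain.pairwise (by decide : List.IsChain (· < ·) pvDeps)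

theorem mem_pvMerge (xs ys : List Int) (a : Int) : a ∈ pvMerge xs ys ↔ a ∈ xs ∨ a ∈ ys := by
  fun_induction pvMerge xs ys with
  | case1 ys => simp
  | case2 x xs => simp
  | case3 x xs y ys h ih => simp [ih]; tauto
  | case4 x xs y ys h h' ih => simp [ih]; tauto
  | case5 x xs y ys h h' ih =>
    have : x = y := le_antisymm (not_lt.mp h') (not_lt.mp h)
    simp [ih, this]; tauto

theorem pvMerge_pairwise {xs ys : List Int} (hx : xs.Pairwise (· < ·)) (hy : ys.Pairwise (· < ·)) :
    (pvMerge xs ys).Pairwise (· < ·) := by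
  fun_induction pvMerge xs ys with
  | case1 ys => exact hy
  | case2 x xs => exact hx
  | case3 x xs y ys h ih =>
    refine List.pairwise_cons.mpr ⟨?_, ih hx.tail hy⟩
    intro z hz
    rcases (mem_pvMerge _ _ _).mp hz with hz | hz
    · exact List.pairwise_cons.mp hx |>.1 z hz
    · rcases List.mem_cons.mp hz with rfl | hz
      · exact h
      · exact h.trans (List.pairwise_cons.mp hy |>.1 z hz)
  | case4 x xs y ys h h' ih =>
    refine List.pairwise_cons.mpr ⟨?_, ih hx hy.tail⟩
    intro z hz
    rcases (mem_pvMerge _ _ _).mp hz with hz | hz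
    · rcases List.mem_cons.mp hz with rfl | hz
      · exact h'
      · exact h'.trans (List.pairwise_cons.mp hx |>.1 z hz)
    · exact List.pairwise_cons.mp hy |>.1 z hz
  | case5 x xs y ys h h' ih =>
    have hxy : x = y := le_antisymm (not_lt.mp h') (not_lt.mp h)
    refine List.pairwise_cons.mpr ⟨?_, ih hx.tail hy.tail⟩
    intro z hz
    rcases (mem_pvMerge _ _ _).mp hz with hz | hz
    · exact List.pairwise_cons.mp hx |>.1 z hz
    · exact hxy ▸ List.pairwise_cons.mp hy |>.1 z hz

theorem main_goal (now t1 : Int) (st : List (String × List Int)) (dir : Bool) (n : Int) :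
    nextrain now t1 st dir n = nextrain_alt now t1 st dir n := by
  have hT : pvTotaltime st = (st.map (fun p => PySem.List.pyGetD p.2 1 0)).sum := by
    simpa using PySem.List.foldl_add st (fun p => PySem.List.pyGetD p.2 1 0) 0
  set o2 := (st.map (fun p => PySem.List.pyGetD p.2 1 0)).sum - t1 with ho2
  simp only [nextrain, nextrain_alt, hT, ← ho2]
  norm_num [← ho2]
  have hfa :
      (if dir = true then
          if now < 1380 + o2 ∧ 1380 + o2 < 1440 then
            (if now < 1380 + t1 ∧ 1380 + t1 < 1440 then [1380 + t1] else []) ++ [1380 + o2]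
          else if now < 1380 + t1 ∧ 1380 + t1 < 1440 then [1380 + t1] else []
        else if now < 1380 + t1 ∧ 1380 + t1 < 1440 then [1380 + t1] else [])
        = List.filter (fun t => decide (now < t) && decide (t < 1440))
            (if dir = true then [1380 + t1, 1380 + o2] else [1380 + t1]) := by
    cases dir <;> split_ifs <;> simp_all
  rw [hfa]
  set fa := List.filter (fun t => decide (now < t) && decide (t < 1440))
      (if dir = true then [1380 + t1, 1380 + o2] else [1380 + t1]) with hfadef
  by_cases hnow : 1380 ≤ now
  · simp [hnow]
  · simp only [if_neg hnow]
    set L := pvLoopA 300 now t1 o2 dir 360 [] with hLdef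
    set fwd := List.map (fun d => d + t1) (List.filter (fun d => decide (now < d + t1)) pvDeps) with hfwd
    set bwd := if dir = true then List.map (fun d => d + o2) (List.filter (fun d => decide (now < d + o2)) pvDeps) else [] with hbwd
    have hmemL : ∀ a, a ∈ L ↔ a ∈ fwd ∨ a ∈ bwd := by
      intro a
      rw [hLdef, pvLoopA_eq, pvDepsA_eq]
      cases dir <;>
        simp [pvChunk, List.mem_flatMap, List.mem_filter, List.mem_map, hfwd, hbwd] <;>
        aesop
    have hfwdP : fwd.Pairwise (· < ·) :=
      List.pairwise_map.mpr ((List.Pairwise.filter _ pvDeps_pairwise).imp (by omega))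
    have hbwdP : bwd.Pairwise (· < ·) := by
      rw [hbwd]; cases dir
      · simp
      · exact List.pairwise_map.mpr ((List.Pairwise.filter _ pvDeps_pairwise).imp (by omega))
    cases hmin : PySem.List.min? fa (fun x => x) with
    | none =>
      have hextraP : ([] : List Int).Pairwise (· < ·) := by simp
      have hMP := pvMerge_pairwise (pvMerge_pairwise hfwdP hbwdP) hextraP
      have hperm : (pvMerge (pvMerge fwd bwd) []).Perm (PySem.Set.ofList L) := by
        refine (List.perm_ext_iff_of_nodup (hMP.imp fun h => ne_of_lt h) (PySem.Set.nodup_ofList L)).mpr ?_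
        intro a
        rw [PySem.Set.mem_ofList, mem_pvMerge, mem_pvMerge, hmemL a]
        simp
      rw [PySem.List.sorted_eq_of_perm_of_pairwise_lt _ _ _ hperm hMP,
        PySem.List.slice_to _ (by norm_num : (0:Int) ≤ 5)]
      rfl
    | some m =>
      have hextraP : ([m] : List Int).Pairwise (· < ·) := by simp
      have hMP := pvMerge_pairwise (pvMerge_pairwise hfwdP hbwdP) hextraP
      have hmemL' : ∀ a, a ∈ (if m ∈ L then L else L ++ [m]) ↔ a ∈ L ∨ a = m := by
        intro a; split_ifs with h
        · constructor
          · exact Or.inl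
          · rintro (ha | rfl) <;> [exact ha; exact h]
        · simp
      have hperm : (pvMerge (pvMerge fwd bwd) [m]).Perm
          (PySem.Set.ofList (if m ∈ L then L else L ++ [m])) := by
        refine (List.perm_ext_iff_of_nodup (hMP.imp fun h => ne_of_lt h) (PySem.Set.nodup_ofList _)).mpr ?_
        intro a
        rw [PySem.Set.mem_ofList, mem_pvMerge, mem_pvMerge, hmemL' a, hmemL a]
        simp
      rw [PySem.List.sorted_eq_of_perm_of_pairwise_lt _ _ _ hperm hMP,
        PySem.List.slice_to _ (by norm_num : (0:Int) ≤ 5)]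
      rfl

-- ===== VERDICT =====
theorem nextrain_spec : Claim_equal_nextrain := by
  intro now t1 st dir n _ _
  unfold Spec_nextrain
  exact main_goal now t1 st dir n
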